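-- pv_equiv track=rewrite | github.com/posl/comment_recommendation | script/split_gen/3_time/zh/161_D/0.py | isLunLun
-- ===== SOURCE A (Python) =====
-- def isLunLun(x):
--     if x < 10:
--         return True
--     else:
--         x = str(x)
--         for i in range(1, len(x)):
--             if abs(int(x[i]) - int(x[i-1])) > 1:
--                 return False
--         return True
-- ===== SOURCE B (Python) =====
-- def isLunLun(x):
--     if x < 10:
--         return True
--     prev = x % 10
--     x //= 10
--     while x:
--         cur = x % 10
--         if abs(cur - prev) > 1:
--             return False
--         prev = cur
--         x //= 10
--     return True
-- ===== Notes on version B (the rewrite author's own statement) =====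
-- stated objective: alternative
-- what changed: B extracts digits least-significant-first with % 10 and // 10 instead of converting to a string and re-parsing each character with int(), checking the same adjacency condition in the reverse order.
import Mathlib
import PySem

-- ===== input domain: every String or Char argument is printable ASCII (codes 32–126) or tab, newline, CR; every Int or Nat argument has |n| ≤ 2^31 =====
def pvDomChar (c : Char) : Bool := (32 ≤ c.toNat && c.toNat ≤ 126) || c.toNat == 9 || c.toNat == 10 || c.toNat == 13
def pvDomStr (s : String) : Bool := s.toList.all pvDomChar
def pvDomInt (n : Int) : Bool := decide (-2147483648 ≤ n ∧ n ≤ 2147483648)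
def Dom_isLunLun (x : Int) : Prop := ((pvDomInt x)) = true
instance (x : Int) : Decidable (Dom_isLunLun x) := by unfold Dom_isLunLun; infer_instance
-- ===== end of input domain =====

-- B replaces A's string conversion + per-character int() parsing by least-significant-first
-- digit extraction with % 10 and // 10 (same adjacency test, alternative representation).


-- ===== PORT A =====
-- int(x[i]) for a single character; the index is always in range and the character is always
-- a decimal digit here (the guard has already ruled out single-digit inputs), so the defaults are never used
def pvDigitAt (s : List Char) (i : Int) : Int :=
  (PySem.Int.ofChars? [PySem.List.pyGetD s i ' ']).getD 0

-- the 'for i in range(1, len(x))' loop with its early 'return False'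
def pvALoop (s : List Char) : List Int → Bool
  | [] => true
  | i :: rest =>
      if 1 < (pvDigitAt s i - pvDigitAt s (i - 1)).natAbs then false
      else pvALoop s rest

def isLunLun (x : Int) : Bool :=
  if x < 10 then true
  else
    -- x = str(x); strings are handled on the List Char side (toChars = (toStr x).toList)
    let s := PySem.Int.toChars x
    pvALoop s (PySem.List.pyRange 1 (s.length : Int) 1)

-- ===== PORT B =====
-- the 'while x:' loop; x is strictly positive on every entry (reached only past the single-digit guard),
-- so '0 < x' is the totality guard for Python's 'while x:'
def pvBLoop (x prev : Int) : Bool :=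
  if h : 0 < x then
    let cur := PySem.Int.mod x 10
    if 1 < (cur - prev).natAbs then false
    else pvBLoop (PySem.Int.floordiv x 10) cur
  else true
termination_by x.toNat
decreasing_by
  have h2 : PySem.Int.floordiv x 10 = x / 10 := PySem.Int.floordiv_eq_ediv_of_pos (by omega)
  rw [h2]; omega

def isLunLun_alt (x : Int) : Bool :=
  if x < 10 then true
  else pvBLoop (PySem.Int.floordiv x 10) (PySem.Int.mod x 10)

-- ===== PRECONDITION & SPEC =====
def Spec_isLunLun (x : Int) (out : Bool) : Prop := out = isLunLun_alt x
instance (x : Int) (out : Bool) : Decidable (Spec_isLunLun x out) := by unfold Spec_isLunLun; infer_instance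

-- ===== CLAIM (what is proved, stated in full; the proofs are below) =====
def Claim_equal_isLunLun : Prop := ∀ (x : Int), Dom_isLunLun x → Spec_isLunLun x (isLunLun x)

-- ===== LEMMAS AND PROOFS =====

-- the common adjacency check, prev-first, over a list of digit values
def pvChk (prev : Int) : List Int → Bool
  | [] => true
  | d :: ds => if 1 < (d - prev).natAbs then false else pvChk d ds

theorem pvChk_iff_chain (l : List Int) (p : Int) :
    pvChk p l = true ↔ List.IsChain (fun a b => (b - a).natAbs ≤ 1) (p :: l) := by
  induction l generalizing p with
  | nil => exact ⟨fun _ => List.IsChain.singleton p, fun _ => rfl⟩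
  | cons d ds ih =>
      simp only [pvChk, List.isChain_cons_cons]
      by_cases h : 1 < (d - p).natAbs
      · rw [if_pos h]
        simp only [Bool.false_eq_true, false_iff, not_and]
        intro h2 _
        omega
      · rw [if_neg h, ih d]
        exact ⟨fun hc => ⟨by omega, hc⟩, fun hc => hc.2⟩

theorem pvBLoop_eq (n : Nat) (prev : Int) :
    pvBLoop (n : Int) prev = pvChk prev ((Nat.digits 10 n).map (Nat.cast)) := by
  induction n using Nat.strong_induction_on generalizing prev with
  | _ n ih =>
      by_cases hn : 0 < n
      · rw [pvBLoop]
        have hm : PySem.Int.mod (n : Int) 10 = ((n % 10 : Nat) : Int) := by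
          exact_mod_cast PySem.Int.mod_natCast n 10
        have hdv : PySem.Int.floordiv (n : Int) 10 = ((n / 10 : Nat) : Int) := by
          exact_mod_cast PySem.Int.floordiv_natCast n 10
        rw [dif_pos (by exact_mod_cast hn)]
        simp only [hm, hdv]
        rw [Nat.digits_def' (by norm_num) hn]
        simp only [pvChk, List.map_cons]
        split
        · rfl
        · exact ih (n / 10) (Nat.div_lt_self hn (by norm_num)) _
      · have h0 : n = 0 := by omega
        subst h0
        rw [pvBLoop, dif_neg (by norm_num)]
        rfl

theorem pvDigitAt_digitChar (d : Nat) (hd : d < 10) :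
    (PySem.Int.ofChars? [Nat.digitChar d]).getD 0 = (d : Int) := by
  interval_cases d <;> decide

-- Nat.toDigits is the reversed digitChar image of Nat.digits (for positive n)
theorem toDigitsCore_eq (f : Nat) : ∀ (n : Nat) (acc : List Char), n < f → 0 < n →
    Nat.toDigitsCore 10 f n acc = ((Nat.digits 10 n).map Nat.digitChar).reverse ++ acc := by
  induction f with
  | zero => intro n acc h; omega
  | succ f ih =>
      intro n acc hnf hn
      rw [Nat.toDigitsCore]
      rw [Nat.digits_def' (by norm_num) hn]
      by_cases h : n / 10 = 0
      · rw [if_pos h, h, Nat.digits_zero]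
        simp
      · rw [if_neg h, ih (n / 10) _ (by omega) (by omega)]
        simp

theorem toDigits_eq (n : Nat) (hn : 0 < n) :
    Nat.toDigits 10 n = ((Nat.digits 10 n).map Nat.digitChar).reverse := by
  rw [Nat.toDigits, toDigitsCore_eq (n + 1) n [] (by omega) hn, List.append_nil]

-- the indexed A-loop is pvChk over the mapped character values
theorem pvALoop_eq (s : List Char) : ∀ (k : Nat) (hk : k < s.length),
    pvALoop s (PySem.List.pyRange ((k : Int) + 1) (s.length : Int) 1) =
      pvChk ((PySem.Int.ofChars? [s[k]]).getD 0)
        ((s.drop (k + 1)).map (fun c => (PySem.Int.ofChars? [c]).getD 0)) := by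
  intro k hk
  induction hmeas : s.length - k generalizing k with
  | zero => omega
  | succ m ih =>
      by_cases hlast : k + 1 < s.length
      · rw [PySem.List.pyRange_one_cons (by omega)]
        have hdrop : s.drop (k + 1) = s[k + 1] :: s.drop (k + 2) := by
          rw [List.drop_eq_getElem_cons hlast]
        simp only [pvALoop, pvDigitAt, add_sub_cancel_right]
        have hg1 : PySem.List.pyGetD s ((k : Int) + 1) ' ' = s[k + 1] := by
          rw [show ((k : Int) + 1) = ((k + 1 : Nat) : Int) by push_cast; ring]
          rw [PySem.List.pyGetD_natCast]
          simp [hlast]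
        have hg0 : PySem.List.pyGetD s ((k : Int)) ' ' = s[k] := by
          rw [PySem.List.pyGetD_natCast]; simp [hk]
        rw [hg1, hg0, hdrop]
        simp only [pvChk, List.map_cons]
        split
        · rfl
        · have := ih (k + 1) hlast (by omega)
          rw [show ((k : Int) + 1 + 1) = ((k + 1 : Nat) : Int) + 1 by push_cast; ring]
          exact this
      · have hkk : k + 1 = s.length := by omega
        rw [show PySem.List.pyRange ((k : Int) + 1) (s.length : Int) 1 = [] from by
          simp [PySem.List.pyRange]; omega]
        rw [List.drop_eq_nil_of_le (by omega)]
        simp [pvALoop, pvChk]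

-- reversal does not matter for the (symmetric) adjacency chain
theorem chain_reverse_iff (l : List Int) :
    List.IsChain (fun a b => (b - a).natAbs ≤ 1) l.reverse ↔
      List.IsChain (fun a b => (b - a).natAbs ≤ 1) l := by
  rw [List.isChain_reverse]
  constructor <;> intro h <;>
    · refine h.imp ?_
      intro a b hab
      omega

-- ===== VERDICT (by name: the statement is the Claim_ definition above) =====
theorem isLunLun_spec : Claim_equal_isLunLun := by
  intro x _
  unfold Spec_isLunLun isLunLun isLunLun_alt
  by_cases hx : x < 10
  · simp [hx]
  · simp only [hx, if_false]
    -- work with the natural number n = x.toNat (the guard put x past the single-digit range)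
    obtain ⟨n, hn⟩ : ∃ n : Nat, x = (n : Int) := ⟨x.toNat, by omega⟩
    subst hn
    have hn10 : 10 ≤ n := by exact_mod_cast not_lt.mp hx
    have hnpos : 0 < n := by omega
    -- A's characters are the reversed decimal digits of n
    have hchars : PySem.Int.toChars (n : Int) = ((Nat.digits 10 n).map Nat.digitChar).reverse := by
      simp only [PySem.Int.toChars]
      rw [if_neg (by omega)]
      simp only [Int.toNat_natCast]
      exact toDigits_eq n hnpos
    have hlen : 0 < (Nat.digits 10 n).length := by
      simpa [List.length_pos_iff] using Nat.digits_ne_nil_iff_ne_zero.mpr (by omega)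
    have hsne : 0 < (PySem.Int.toChars (n : Int)).length := by
      rw [hchars]; simpa using hlen
    have hA := pvALoop_eq (PySem.Int.toChars (n : Int)) 0 hsne
    simp only [Nat.cast_zero, zero_add] at hA
    rw [hA]
    -- B side is the check over the little-endian digits
    have hB : pvBLoop (PySem.Int.floordiv (n : Int) 10) (PySem.Int.mod (n : Int) 10)
        = pvChk ((n % 10 : Nat) : Int) ((Nat.digits 10 (n / 10)).map Nat.cast) := by
      have hm : PySem.Int.mod (n : Int) 10 = ((n % 10 : Nat) : Int) := by
        exact_mod_cast PySem.Int.mod_natCast n 10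
      have hdv : PySem.Int.floordiv (n : Int) 10 = ((n / 10 : Nat) : Int) := by
        exact_mod_cast PySem.Int.floordiv_natCast n 10
      rw [hm, hdv]
      exact pvBLoop_eq (n / 10) _
    rw [hB]
    -- A's character values are the reversed little-endian digit values
    have hvals : (PySem.Int.toChars (n : Int)).map (fun c => (PySem.Int.ofChars? [c]).getD 0)
        = ((Nat.digits 10 n).map Nat.cast).reverse := by
      rw [hchars, ← List.map_reverse, List.map_map, ← List.map_reverse]
      apply List.map_congr_left
      intro d hd
      rw [List.mem_reverse] at hd
      exact pvDigitAt_digitChar d (Nat.digits_lt_base (by norm_num) hd)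
    have hLE : (Nat.digits 10 n).map (Nat.cast (R := Int)) =
        ((n % 10 : Nat) : Int) :: (Nat.digits 10 (n / 10)).map Nat.cast := by
      rw [Nat.digits_def' (by norm_num) hnpos, List.map_cons]
    have hsplit : PySem.Int.toChars (n : Int) =
        (PySem.Int.toChars (n : Int))[0] :: (PySem.Int.toChars (n : Int)).drop 1 := by
      simpa using (List.getElem_cons_drop (as := PySem.Int.toChars (n : Int)) (i := 0) hsne).symm
    have hmapA : (PySem.Int.ofChars? [(PySem.Int.toChars (n : Int))[0]]).getD 0 ::
        ((PySem.Int.toChars (n : Int)).drop 1).map (fun c => (PySem.Int.ofChars? [c]).getD 0)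
        = (PySem.Int.toChars (n : Int)).map (fun c => (PySem.Int.ofChars? [c]).getD 0) := by
      conv_rhs => rw [hsplit]
      rfl
    rw [Bool.eq_iff_iff, pvChk_iff_chain, pvChk_iff_chain, hmapA, hvals, ← hLE,
      chain_reverse_iff]
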